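-- pv_equiv track=rewrite | github.com/muhammedshihab1001/MarketSentinel | app/main.py | _get_path_limit
-- ===== SOURCE A (Python) =====
-- PER_PATH_RATE_LIMITS = {
--     "/auth/owner-login":        (5,  60),
--     "/auth/demo-login":         (10, 60),
--     "/predict/live-snapshot":   (10, 60),
--     "/snapshot":                (10, 60),
--     "/agent/explain":           (20, 60),
--     "/agent/political-risk":    (20, 60),
--     "/performance":             (20, 60),
--     "/health/live":             (60, 60),
--     "/health/ready":            (60, 60),
-- }
--
-- RATE_LIMIT_DEFAULT = (60, 60)
--
-- def _get_path_limit(path: str) -> tuple: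
--     """Return (max_requests, window_seconds) for the given path."""
--     for prefix, limits in PER_PATH_RATE_LIMITS.items():
--         if (
--             path == prefix
--             or path.startswith(prefix + "/")
--             or path.startswith(prefix + "?")
--         ):
--             return limits
--     return RATE_LIMIT_DEFAULT
-- ===== SOURCE B (Python) =====
-- PER_PATH_RATE_LIMITS = {
--     "/auth/owner-login":        (5,  60),
--     "/auth/demo-login":         (10, 60),
--     "/predict/live-snapshot":   (10, 60),
--     "/snapshot":                (10, 60),
--     "/agent/explain":           (20, 60),
--     "/agent/political-risk":    (20, 60),
--     "/performance":             (20, 60),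
--     "/health/live":             (60, 60),
--     "/health/ready":            (60, 60),
-- }
--
-- RATE_LIMIT_DEFAULT = (60, 60)
--
-- def _get_path_limit(path: str) -> tuple:
--     """Return (max_requests, window_seconds) for the given path."""
--     # keep only the part before the query string
--     s = ""
--     for ch in path:
--         if ch == '?':
--             break
--         s += ch
--     # look up the longest '/'-boundary prefix of s that is a configured key
--     while s:
--         limits = PER_PATH_RATE_LIMITS.get(s)
--         if limits is not None:
--             return limits
--         # drop the last '/'-separated component
--         while s and s[-1] != '/':
--             s = s[:-1]
--         s = s[:-1]
--     return RATE_LIMIT_DEFAULT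
-- ===== Notes on version B (the rewrite author's own statement) =====
-- stated objective: alternative
-- what changed: B strips the query string once, then repeatedly looks the remaining path up in the dict and cuts it back to its previous slash boundary on a miss, instead of A's linear scan over all nine table entries testing three startswith conditions each; equivalent because no configured key is a slash-boundary prefix of another.
import Mathlib
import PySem

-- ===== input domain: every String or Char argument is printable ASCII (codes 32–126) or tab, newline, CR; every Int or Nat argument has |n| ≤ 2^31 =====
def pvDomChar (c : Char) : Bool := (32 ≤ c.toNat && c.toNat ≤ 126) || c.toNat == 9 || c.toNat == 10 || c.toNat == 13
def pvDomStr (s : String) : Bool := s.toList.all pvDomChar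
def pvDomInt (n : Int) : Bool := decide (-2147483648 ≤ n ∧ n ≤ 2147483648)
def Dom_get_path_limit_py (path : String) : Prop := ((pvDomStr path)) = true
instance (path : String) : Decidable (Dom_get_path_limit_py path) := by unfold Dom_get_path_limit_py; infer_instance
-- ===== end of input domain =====

-- B replaces A's linear scan over all nine table entries by dict lookups on the query-stripped
-- path's '/'-boundary prefixes, longest first (objective: alternative, same behaviour on every input).

-- ===== PORT A =====
-- the module-level dict PER_PATH_RATE_LIMITS as an association list in insertion order
def pvTableS : List (String × (Int × Int)) :=
  [ ("/auth/owner-login",      (5,  60)),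
    ("/auth/demo-login",       (10, 60)),
    ("/predict/live-snapshot", (10, 60)),
    ("/snapshot",              (10, 60)),
    ("/agent/explain",         (20, 60)),
    ("/agent/political-risk",  (20, 60)),
    ("/performance",           (20, 60)),
    ("/health/live",           (60, 60)),
    ("/health/ready",          (60, 60)) ]

-- A's 'for prefix, limits in PER_PATH_RATE_LIMITS.items(): if … return limits' loop
def pvScanA : List (String × (Int × Int)) → String → Int × Int
  | [], _ => (60, 60)   -- RATE_LIMIT_DEFAULT
  | (pre, limits) :: rest, path =>
      if path = pre ∨ PySem.Str.startswith path (pre ++ "/") = true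
               ∨ PySem.Str.startswith path (pre ++ "?") = true
      then limits
      else pvScanA rest path

def get_path_limit_py (path : String) : Int × Int := pvScanA pvTableS path

-- ===== PORT B =====
-- the same dict, keys as List Char (strings are ported through .toList)
def pvDict : PySem.Dict (List Char) (Int × Int) :=
  PySem.Dict.ofList (pvTableS.map (fun e => (e.1.toList, e.2)))

-- Source B's first loop: 'for ch in path: if ch == '?': break; s += ch'
def pvStripQ : List Char → List Char
  | [] => []
  | c :: t => if c = '?' then [] else c :: pvStripQ t

-- Source B's inner loop: 'while s and s[-1] != '/': s = s[:-1]'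
def pvTrim (s : List Char) : List Char :=
  match h : s.getLast? with
  | none => s
  | some c => if c = '/' then s else pvTrim s.dropLast
termination_by s.length
decreasing_by
  have hne : s ≠ [] := by intro hs; subst hs; simp at h
  have : 0 < s.length := List.length_pos_iff.mpr hne
  simp [List.length_dropLast]; omega

-- needed by pvLoop's decreasing_by (cited there by name)
theorem pvTrim_length_le (s : List Char) : (pvTrim s).length ≤ s.length := by
  fun_induction pvTrim s with
  | case1 => exact le_rfl
  | case2 => exact le_rfl
  | case3 s h c hc ih =>
      exact le_trans ih (by simp [List.length_dropLast])

-- Source B's outer loop: 'while s: … return limits …; s = s[:-1]'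
def pvLoop (s : List Char) : Int × Int :=
  if s = [] then (60, 60)   -- RATE_LIMIT_DEFAULT
  else
    match pvDict.get? s with
    | some limits => limits
    | none => pvLoop ((pvTrim s).dropLast)
termination_by s.length
decreasing_by
  have h1 : ((pvTrim s).dropLast).length ≤ (pvTrim s).length := by
    simp [List.length_dropLast]
  have h2 := pvTrim_length_le s
  have hne : s ≠ [] := by assumption
  have hpos : 0 < s.length := List.length_pos_iff.mpr hne
  rcases Nat.eq_zero_or_pos (pvTrim s).length with h0 | h0
  · omega
  · simp [List.length_dropLast] at h1 ⊢; omega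

def get_path_limit_py_alt (path : String) : Int × Int := pvLoop (pvStripQ path.toList)

-- ===== PRECONDITION & SPEC =====
def Spec_get_path_limit_py (path : String) (out : Int × Int) : Prop := out = get_path_limit_py_alt path
instance (path : String) (out : Int × Int) : Decidable (Spec_get_path_limit_py path out) := by unfold Spec_get_path_limit_py; infer_instance

-- ===== CLAIM (what is proved, stated in full; the proofs are below) =====
def Claim_equal_get_path_limit_py : Prop := ∀ (path : String), Dom_get_path_limit_py path → Spec_get_path_limit_py path (get_path_limit_py path)

-- ===== LEMMAS AND PROOFS =====

-- the table at List Char level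
def pvTableL : List (List Char × (Int × Int)) := pvTableS.map (fun e => (e.1.toList, e.2))

-- reference scan: A's scan after the query string has been stripped
def pvScanS : List (List Char × (Int × Int)) → List Char → Int × Int
  | [], _ => (60, 60)
  | (k, l) :: rest, s => if s = k ∨ k ++ ['/'] <+: s then l else pvScanS rest s

-- concrete facts about the key set
theorem pvKeysOk : ∀ e ∈ pvTableL, ('?' ∉ e.1 ∧ e.1 ≠ []) := by decide
theorem pvKeysNoBoundaryPrefix : ∀ e ∈ pvTableL, ∀ e' ∈ pvTableL, ¬ (e.1 ++ ['/'] <+: e'.1) := by decide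
theorem pvDict_eq_mk : pvDict = PySem.Dict.mk pvTableL := by decide

theorem stripQ_append {k r : List Char} (h : ('?' : Char) ∉ k) :
    pvStripQ (k ++ r) = k ++ pvStripQ r := by
  induction k with
  | nil => rfl
  | cons c t ih =>
      have hc : c ≠ '?' := by intro hc; exact h (by simp [hc])
      simp [pvStripQ, hc, ih (by intro hm; exact h (by simp [hm]))]

theorem stripQ_prefix (p : List Char) : pvStripQ p <+: p := by
  induction p with
  | nil => simp [pvStripQ]
  | cons c t ih =>
      by_cases hc : c = '?'
      · simp [pvStripQ, hc]
      · simpa [pvStripQ, hc] using ih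

theorem stripQ_decomp (p : List Char) :
    ∃ r, p = pvStripQ p ++ r ∧ (r = [] ∨ ∃ t, r = '?' :: t) := by
  induction p with
  | nil => exact ⟨[], by simp [pvStripQ]⟩
  | cons c t ih =>
      by_cases hc : c = '?'
      · exact ⟨c :: t, by simp [pvStripQ, hc], Or.inr ⟨t, by rw [hc]⟩⟩
      · obtain ⟨r, hr, hr2⟩ := ih
        exact ⟨r, by simpa [pvStripQ, hc] using hr, hr2⟩

-- bridge: A's three-way condition on the raw path equals the two-way condition on the stripped path
theorem cond_bridge {k p : List Char} (hq : ('?' : Char) ∉ k) :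
    (p = k ∨ (k ++ ['/']) <+: p ∨ (k ++ ['?']) <+: p) ↔
    (pvStripQ p = k ∨ (k ++ ['/']) <+: pvStripQ p) := by
  constructor
  · rintro (rfl | ⟨t, rfl⟩ | ⟨t, rfl⟩)
    · left
      have := stripQ_append (r := ([] : List Char)) hq
      simpa [pvStripQ] using this
    · right
      have : pvStripQ (k ++ ['/'] ++ t) = k ++ pvStripQ ('/' :: t) := by
        rw [List.append_assoc]; exact stripQ_append hq
      rw [this]; simp [pvStripQ]
    · left
      have : pvStripQ (k ++ ['?'] ++ t) = k ++ pvStripQ ('?' :: t) := by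
        rw [List.append_assoc]; exact stripQ_append hq
      rw [this]; simp [pvStripQ]
  · rintro (hk | hpre)
    · obtain ⟨r, hr, hr2⟩ := stripQ_decomp p
      rcases hr2 with rfl | ⟨t, rfl⟩
      · left; rw [hr, hk]; simp
      · right; right; rw [hr, hk]; exact ⟨t, by simp⟩
    · right; left; exact hpre.trans (stripQ_prefix p)

-- A's scan equals the reference scan on the stripped path
theorem scanA_eq (tbl : List (String × (Int × Int))) (path : String)
    (h : ∀ e ∈ tbl, ('?' : Char) ∉ e.1.toList) :
    pvScanA tbl path = pvScanS (tbl.map fun e => (e.1.toList, e.2)) (pvStripQ path.toList) := by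
  induction tbl with
  | nil => rfl
  | cons e rest ih =>
      obtain ⟨k, l⟩ := e
      have hq : ('?' : Char) ∉ k.toList := h (k, l) (by simp)
      have hcond : (path = k ∨ PySem.Str.startswith path (k ++ "/") = true
                     ∨ PySem.Str.startswith path (k ++ "?") = true) ↔
          (pvStripQ path.toList = k.toList ∨ k.toList ++ ['/'] <+: pvStripQ path.toList) := by
        rw [← cond_bridge hq]
        constructor
        · rintro (rfl | hs | hs)
          · exact Or.inl rfl
          · right; left
            have := (PySem.Chars.startswith_iff (s := path.toList) (p := (k ++ "/").toList)).mp (by simpa using hs)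
            simpa using this
          · right; right
            have := (PySem.Chars.startswith_iff (s := path.toList) (p := (k ++ "?").toList)).mp (by simpa using hs)
            simpa using this
        · rintro (hteq | hs | hs)
          · exact Or.inl (String.ext_iff.mpr hteq)
          · right; left
            simpa using (PySem.Chars.startswith_iff (s := path.toList) (p := (k ++ "/").toList)).mpr (by simpa using hs)
          · right; right
            simpa using (PySem.Chars.startswith_iff (s := path.toList) (p := (k ++ "?").toList)).mpr (by simpa using hs)
      by_cases hc : pvStripQ path.toList = k.toList ∨ k.toList ++ ['/'] <+: pvStripQ path.toList
      · simp only [pvScanA, List.map_cons, pvScanS, if_pos (hcond.mpr hc), if_pos hc]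
      · simp only [pvScanA, List.map_cons, pvScanS, if_neg (fun hx => hc (hcond.mp hx)), if_neg hc]
        exact ih (fun e he => h e (by simp [he]))

-- pvTrim cuts exactly the (slash-free) last component off, keeping the final '/'
theorem pvTrim_spec (s : List Char) :
    ∃ w, s = pvTrim s ++ w ∧ ('/' : Char) ∉ w ∧ (pvTrim s = [] ∨ ∃ u, pvTrim s = u ++ ['/']) := by
  fun_induction pvTrim s with
  | case1 s h =>
      have hnil : s = [] := List.getLast?_eq_none_iff.mp h
      exact ⟨[], by simp, by simp, Or.inl hnil⟩
  | case2 s h =>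
      have hne : s ≠ [] := by intro hs; subst hs; simp at h
      refine ⟨[], by simp, by simp, Or.inr ⟨s.dropLast, ?_⟩⟩
      have hd : s.dropLast ++ [s.getLast hne] = s := List.dropLast_append_getLast hne
      have hl : s.getLast hne = '/' := by
        have h2 := List.getLast?_eq_some_getLast (l := s) hne
        exact Option.some_inj.mp (h2.symm.trans h)
      rw [hl] at hd; exact hd.symm
  | case3 s c h hc ih =>
      obtain ⟨w, hw, hw2, hw3⟩ := ih
      have hne : s ≠ [] := by intro hs; subst hs; simp at h
      have hlast : s.getLast hne = c := by
        have h2 := List.getLast?_eq_some_getLast (l := s) hne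
        exact Option.some_inj.mp (h2.symm.trans h)
      refine ⟨w ++ [c], ?_, ?_, hw3⟩
      · have h2 : (pvTrim s.dropLast ++ w) ++ [c] = pvTrim s.dropLast ++ (w ++ [c]) := by simp
        rw [← h2, ← hw, ← hlast]
        exact (List.dropLast_append_getLast hne).symm
      · intro hm
        rcases List.mem_append.mp hm with hm | hm
        · exact hw2 hm
        · have h3 : ('/' : Char) = c := by simpa using hm
          exact hc h3.symm

-- the per-key condition is invariant under one step of B's loop (for keys other than s itself)
theorem cond_step {k s : List Char} (hk : k ≠ []) (hne : k ≠ s) :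
    ((s = k ∨ k ++ ['/'] <+: s) ↔
     ((pvTrim s).dropLast = k ∨ k ++ ['/'] <+: (pvTrim s).dropLast)) := by
  obtain ⟨w, hw, hwn, hT⟩ := pvTrim_spec s
  rcases hT with hT0 | ⟨u, hTu⟩
  · rw [hT0] at hw; simp at hw
    constructor
    · rintro (rfl | hp)
      · exact absurd rfl hne
      · exfalso
        have hmem : ('/' : Char) ∈ s := hp.sublist.mem (by simp)
        rw [hw] at hmem
        exact hwn hmem
    · rintro (hk0 | hp)
      · exact absurd (by simpa [hT0] using hk0.symm) hk
      · exfalso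
        have := hp.length_le
        simp [hT0] at this
  · have hs' : (pvTrim s).dropLast = u := by rw [hTu]; simp
    have hsu : s = u ++ '/' :: w := by rw [hw, hTu]; simp
    rw [hs']
    constructor
    · rintro (rfl | hp)
      · exact absurd rfl hne
      · -- k ++ ['/'] and u ++ ['/'] are both prefixes of s
        have hup : u ++ ['/'] <+: s := ⟨w, by rw [hsu]; simp⟩
        by_cases hlen : k.length ≤ u.length
        · have hpp : k ++ ['/'] <+: u ++ ['/'] :=
            List.prefix_of_prefix_length_le hp hup (by simp [hlen])
          rcases Nat.lt_or_ge k.length u.length with hlt | hge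
          · right; exact (List.isPrefix_append_of_length (by simp; omega)).mp hpp
          · left
            have : k ++ ['/'] = u ++ ['/'] := hpp.eq_of_length (by simp; omega)
            have := congrArg List.dropLast this
            simpa using this.symm
        · exfalso
          push_neg at hlen
          have hpp : u ++ ['/'] <+: k ++ ['/'] :=
            List.prefix_of_prefix_length_le hup hp (by simp; omega)
          have huk : u ++ ['/'] <+: k := (List.isPrefix_append_of_length (by simp; omega)).mp hpp
          obtain ⟨k2, hk2⟩ := huk
          obtain ⟨rest, hrest⟩ := hp
          rw [← hk2] at hrest
          rw [hsu] at hrest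
          have hw' : w = k2 ++ '/' :: rest := by
            have : u ++ ('/' :: (k2 ++ '/' :: rest)) = u ++ '/' :: w := by
              rw [← hrest]; simp
            have := List.append_cancel_left this
            simpa using this.symm
          exact hwn (by rw [hw']; simp)
    · rintro (rfl | hp)
      · right; exact ⟨w, by rw [hsu]; simp⟩
      · right; exact hp.trans ⟨'/' :: w, by rw [hsu]⟩

theorem scanS_default {tbl : List (List Char × (Int × Int))} {s : List Char}
    (h : ∀ e ∈ tbl, ¬ (s = e.1 ∨ e.1 ++ ['/'] <+: s)) : pvScanS tbl s = (60, 60) := by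
  induction tbl with
  | nil => rfl
  | cons e rest ih =>
      obtain ⟨k, l⟩ := e
      simp only [pvScanS, if_neg (h (k, l) (by simp))]
      exact ih (fun e he => h e (by simp [he]))

theorem scanS_lookup {tbl : List (List Char × (Int × Int))} {s : List Char} {v : Int × Int}
    (h : (PySem.Dict.mk tbl).get? s = some v)
    (h2 : ∀ e ∈ tbl, ¬ (e.1 ++ ['/'] <+: s)) : pvScanS tbl s = v := by
  induction tbl with
  | nil => simp [pysem, PySem.Dict.get?] at h
  | cons e rest ih =>
      obtain ⟨k, l⟩ := e
      rw [PySem.Dict.get?_mk_cons] at h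
      by_cases hk : k = s
      · simp [hk] at h
        simp only [pvScanS, if_pos (Or.inl hk.symm), h]
      · have hbk : (k == s) = false := by simp [hk]
        rw [hbk] at h; simp at h
        have hcond : ¬ (s = k ∨ k ++ ['/'] <+: s) := by
          rintro (rfl | hp)
          · exact hk rfl
          · exact h2 (k, l) (by simp) hp
        simp only [pvScanS, if_neg hcond]
        exact ih h (fun e he => h2 e (by simp [he]))

theorem scanS_congr {tbl : List (List Char × (Int × Int))} {s s' : List Char}
    (h : ∀ e ∈ tbl, ((s = e.1 ∨ e.1 ++ ['/'] <+: s) ↔ (s' = e.1 ∨ e.1 ++ ['/'] <+: s'))) :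
    pvScanS tbl s = pvScanS tbl s' := by
  induction tbl with
  | nil => rfl
  | cons e rest ih =>
      obtain ⟨k, l⟩ := e
      have he := h (k, l) (by simp)
      by_cases hc : s = k ∨ k ++ ['/'] <+: s
      · simp only [pvScanS, if_pos hc, if_pos (he.mp hc)]
      · simp only [pvScanS, if_neg hc, if_neg (fun hx => hc (he.mpr hx))]
        exact ih (fun e hee => h e (by simp [hee]))

theorem scanS_eq_pvLoop : ∀ (n : Nat) (s : List Char), s.length ≤ n →
    pvScanS pvTableL s = pvLoop s := by
  intro n
  induction n with
  | zero =>
      intro s hs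
      have : s = [] := by simpa using List.length_eq_zero_iff.mp (Nat.le_zero.mp hs)
      subst this
      rw [pvLoop]; simp only [if_pos]
      apply scanS_default
      intro e he
      rintro (hk | hp)
      · exact (pvKeysOk e he).2 hk.symm
      · have := hp.length_le; simp at this
  | succ n ih =>
      intro s hs
      by_cases hnil : s = []
      · subst hnil
        rw [pvLoop]; simp only [if_pos]
        apply scanS_default
        intro e he
        rintro (hk | hp)
        · exact (pvKeysOk e he).2 hk.symm
        · have := hp.length_le; simp at this
      · rw [pvLoop, if_neg hnil]
        cases hget : pvDict.get? s with
        | some v =>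
            rw [pvDict_eq_mk] at hget
            apply scanS_lookup hget
            -- s is a key; no key is a boundary prefix of a key
            have hmem : s ∈ (PySem.Dict.mk pvTableL).keys := by
              by_contra hmem
              rw [(PySem.Dict.get?_eq_none_iff_not_mem_keys _ _).mpr hmem] at hget
              simp at hget
            simp only [PySem.Dict.keys_mk, List.mem_map] at hmem
            obtain ⟨e0, he0, he0s⟩ := hmem
            intro e he hp
            rw [← he0s] at hp
            exact pvKeysNoBoundaryPrefix e he e0 he0 hp
        | none =>
            rw [pvDict_eq_mk] at hget
            have hnk : s ∉ (PySem.Dict.mk pvTableL).keys :=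
              (PySem.Dict.get?_eq_none_iff_not_mem_keys _ _).mp hget
            have hnotkey : ∀ e ∈ pvTableL, e.1 ≠ s := by
              intro e he hek
              exact hnk (by simp only [PySem.Dict.keys_mk, List.mem_map]; exact ⟨e, he, hek⟩)
            have hstep : pvScanS pvTableL s = pvScanS pvTableL ((pvTrim s).dropLast) := by
              apply scanS_congr
              intro e he
              exact cond_step (pvKeysOk e he).2 (hnotkey e he)
            rw [hstep]
            apply ih
            have h2 := pvTrim_length_le s
            have hpos : 0 < s.length := List.length_pos_iff.mpr hnil
            have h4 : ((pvTrim s).dropLast).length = (pvTrim s).length - 1 := by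
              simp [List.length_dropLast]
            omega

-- ===== VERDICT (by name: the statement is the Claim_ definition above) =====
theorem get_path_limit_py_spec : Claim_equal_get_path_limit_py := by
  intro path _
  unfold Spec_get_path_limit_py get_path_limit_py get_path_limit_py_alt
  rw [scanA_eq pvTableS path (by decide)]
  exact scanS_eq_pvLoop (pvStripQ path.toList).length _ le_rfl
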